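-- pv_equiv track=rewrite | github.com/DSIMB/ICARUS | icarus.py | get_pus_connections_and_new_pu_delims
-- ===== SOURCE A (Python) =====
-- def get_pus_connections_and_new_pu_delims(line_CHAIN1, PUs_delim_to_keep, pu_lengths):
--     """
--     Set PUs connections symbols:  +--------++-----------+
--     Set the new PU delimitations by taking into account the
--     different gaps in the alignment (begining gaps and intra sequence gaps)
--
--     Args:
--         - line_CHAIN1 (str): line of the CHAIN1 sequence
--         - PUs_delim_to_keep (list): list of PU delimitations to keep
--         - pu_lengths (list): list of PU lengths
--
--     Returns:
--         - line_PUs_connections (str): line of the PUs connections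
--         - new_delims (list): list of new PU delimitations
--     """
--     line_PU_connection = ""
--     i = 0
--     # Shift the beginning of line if the alignment starts by gaps
--     nb_begining_gaps = 0
--     while line_CHAIN1[i] == "-":
--         line_PU_connection += " "
--         nb_begining_gaps += 1
--         i += 1
--     new_delims = {}
--     # Go through the query after removing flanking gaps "-"
--     # Calculate the new delimitations of PUs taking into account gaps
--     idx = 0
--     pu_idx = 0
--     pu_len = 1
--     nb_intra_gaps = 0
--     for i, res in enumerate(line_CHAIN1.strip("-"), start=1):
--         # Stop if we reach the maximum position of the available PUs
--         # before the end of the full alignmnent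
--         if (i - nb_intra_gaps) > max(PUs_delim_to_keep):
--             break
--         # This is a gap
--         if res == "-":
--             line_PU_connection += "-"
--             nb_intra_gaps += 1
--         else:
--             # We traced the full length of a PU
--             if pu_len == pu_lengths[idx]:
--                 new_delims[PUs_delim_to_keep[pu_idx]] = i + nb_begining_gaps
--                 line_PU_connection += "+"
--                 pu_len = 1
--                 idx += 1
--                 pu_idx += 1
--             # This is the beginning of a new traced PU
--             elif pu_len == 1:
--                 new_delims[PUs_delim_to_keep[pu_idx]] = i + nb_begining_gaps
--                 line_PU_connection += "+"
--                 pu_len += 1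
--                 pu_idx += 1
--             # This is a residue of the current PU
--             else:
--                 line_PU_connection += "-"
--                 pu_len += 1
--     # Case when the end of the alignement is only gaps so we cannot keep
--     # some of the PUs that were supposed to be there
--     if len(new_delims) % 2 != 0:
--        del new_delims[max(new_delims.keys())]
--        PUs_delim_to_keep = [delim for delim in PUs_delim_to_keep if delim in list(new_delims.keys())]
--     return line_PU_connection, new_delims, PUs_delim_to_keep
-- ===== SOURCE B (Python) =====
-- def get_pus_connections_and_new_pu_delims(line_CHAIN1, PUs_delim_to_keep, pu_lengths):
--     nb_begining_gaps = len(line_CHAIN1) - len(line_CHAIN1.lstrip("-"))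
--     line = line_CHAIN1.strip("-")
--     M = max(PUs_delim_to_keep)
--     # boundary table: the non-gap residue counts at which a PU starts or ends
--     bounds = []
--     cum = 0
--     for pl in pu_lengths:
--         bounds.append(cum + 1)        # start of the PU (== its end when pl == 1)
--         if pl >= 2:
--             bounds.append(cum + pl)   # end of the PU
--         cum += pl
--     conn = []
--     new_delims = {}
--     count = 0  # non-gap residues consumed so far
--     b = 0      # index of the next boundary / delimiter
--     for pos, res in enumerate(line, start=1):
--         if count >= M:
--             break
--         if res == "-":
--             conn.append("-")
--             continue
--         count += 1
--         if b < len(bounds) and count == bounds[b]: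
--             new_delims[PUs_delim_to_keep[b]] = pos + nb_begining_gaps
--             conn.append("+")
--             b += 1
--         else:
--             conn.append("-")
--     line_PU_connection = " " * nb_begining_gaps + "".join(conn)
--     if len(new_delims) % 2 != 0:
--         del new_delims[max(new_delims)]
--         PUs_delim_to_keep = [d for d in PUs_delim_to_keep if d in new_delims]
--     return line_PU_connection, new_delims, PUs_delim_to_keep
-- ===== Notes on version B (the rewrite author's own statement) =====
-- stated objective: faster
-- what changed: B precomputes a boundary table of non-gap residue counts from prefix sums of pu_lengths and then makes one linear pass over the stripped line comparing a residue counter against the next table entry, replacing A's per-residue PU state machine (pu_len/idx bookkeeping) that also recomputes max(PUs_delim_to_keep) on every loop iteration; Pre_ excludes exactly the inputs on which A raises (all-gap line, empty delimiter list, or an index overrun of pu_lengths/PUs_delim_to_keep).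
import Mathlib
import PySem

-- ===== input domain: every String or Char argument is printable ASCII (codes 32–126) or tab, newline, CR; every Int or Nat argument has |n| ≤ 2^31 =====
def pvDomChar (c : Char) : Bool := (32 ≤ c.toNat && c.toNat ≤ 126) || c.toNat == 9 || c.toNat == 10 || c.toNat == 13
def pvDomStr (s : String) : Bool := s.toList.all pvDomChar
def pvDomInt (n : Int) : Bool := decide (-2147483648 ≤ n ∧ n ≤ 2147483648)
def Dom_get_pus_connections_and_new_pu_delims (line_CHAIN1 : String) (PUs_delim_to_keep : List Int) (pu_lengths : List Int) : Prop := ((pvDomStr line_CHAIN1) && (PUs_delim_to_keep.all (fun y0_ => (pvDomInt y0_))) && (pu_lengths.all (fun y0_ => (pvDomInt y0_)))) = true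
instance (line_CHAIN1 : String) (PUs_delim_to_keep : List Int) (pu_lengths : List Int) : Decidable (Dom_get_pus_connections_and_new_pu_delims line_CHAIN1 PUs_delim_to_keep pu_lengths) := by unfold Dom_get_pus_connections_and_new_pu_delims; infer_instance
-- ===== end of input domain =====

-- B replaces A's per-residue PU state machine (which recomputes max(PUs_delim_to_keep) every
-- iteration) by a boundary table precomputed from prefix sums of pu_lengths plus one linear pass.

-- shared tail of both Pythons (the identical odd-size cleanup and return packaging)
def pvFinish (conn : List Char) (d : PySem.Dict Int Int) (delims : List Int) :
    String × (List (Int × Int)) × List Int :=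
  if d.size % 2 ≠ 0 then
    match PySem.List.max? d.keys id with
    | none => ("", [], [])   -- unreachable: odd size means nonempty keys
    | some mk =>
      let d' := d.erase mk
      (String.ofList conn, d'.items, delims.filter (fun x => d'.keys.contains x))
  else (String.ofList conn, d.items, delims)

-- ===== PORT A =====
-- while line_CHAIN1[i] == "-": … (IndexError = none when the line is all '-' or empty)
def pvAWhile : List Char → Option Nat
  | [] => none
  | c :: cs => if c = '-' then (pvAWhile cs).map (· + 1) else some 0

-- the for-loop over enumerate(line_CHAIN1.strip("-"), start=1); none = an exception inside the body
def pvALoop (rest : List Char) (i : Int) (conn : List Char) (d : PySem.Dict Int Int)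
    (delims L : List Int) (idx pu_idx : Nat) (pu_len nb_intra_gaps nbg : Int) :
    Option (List Char × PySem.Dict Int Int) :=
  match rest with
  | [] => some (conn, d)
  | res :: rest' =>
    match PySem.List.max? delims id with
    | none => none   -- max() of empty list: ValueError
    | some M =>
      if i - nb_intra_gaps > M then some (conn, d)
      else if res = '-' then
        pvALoop rest' (i+1) (conn ++ ['-']) d delims L idx pu_idx pu_len (nb_intra_gaps+1) nbg
      else
        match PySem.List.pyGet? L (idx : Int) with
        | none => none   -- pu_lengths[idx]: IndexError
        | some li =>
          if pu_len = li then
            match PySem.List.pyGet? delims (pu_idx : Int) with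
            | none => none   -- PUs_delim_to_keep[pu_idx]: IndexError
            | some k =>
              pvALoop rest' (i+1) (conn ++ ['+']) (d.insert k (i + nbg)) delims L (idx+1) (pu_idx+1) 1 nb_intra_gaps nbg
          else if pu_len = 1 then
            match PySem.List.pyGet? delims (pu_idx : Int) with
            | none => none
            | some k =>
              pvALoop rest' (i+1) (conn ++ ['+']) (d.insert k (i + nbg)) delims L idx (pu_idx+1) (pu_len+1) nb_intra_gaps nbg
          else
            pvALoop rest' (i+1) (conn ++ ['-']) d delims L idx pu_idx (pu_len+1) nb_intra_gaps nbg

def get_pus_connections_and_new_pu_delims (line_CHAIN1 : String) (PUs_delim_to_keep : List Int) (pu_lengths : List Int) : String × (List (Int × Int)) × List Int :=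
  match pvAWhile line_CHAIN1.toList with
  | none => ("", [], [])
  | some nbg =>
    match pvALoop (PySem.Chars.stripChars line_CHAIN1.toList ['-']) 1
        (List.replicate nbg ' ') PySem.Dict.empty PUs_delim_to_keep pu_lengths 0 0 1 0 (nbg : Int) with
    | none => ("", [], [])
    | some (conn, d) => pvFinish conn d PUs_delim_to_keep

-- ===== PORT B =====
-- len(line) - len(line.lstrip('-')) : number of leading '-' (hand-ported, exact)
def pvCountLeadDash : List Char → Nat
  | [] => 0
  | c :: cs => if c = '-' then pvCountLeadDash cs + 1 else 0

-- boundary table: the non-gap residue counts at which a PU starts or ends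
def pvBounds : List Int → Int → List Int
  | [], _ => []
  | pl :: ls, cum =>
    if 2 ≤ pl then (cum + 1) :: (cum + pl) :: pvBounds ls (cum + pl)
    else (cum + 1) :: pvBounds ls (cum + pl)

-- B's single pass; bnds is the not-yet-consumed suffix of the boundary table, b the index of the
-- next delimiter; none = IndexError on PUs_delim_to_keep[b]
def pvBLoop (rest : List Char) (pos count : Int) (bnds delims : List Int) (b : Nat)
    (M nbg : Int) (conn : List Char) (d : PySem.Dict Int Int) :
    Option (List Char × PySem.Dict Int Int) :=
  match rest with
  | [] => some (conn, d)
  | res :: rest' =>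
    if M ≤ count then some (conn, d)
    else if res = '-' then
      pvBLoop rest' (pos+1) count bnds delims b M nbg (conn ++ ['-']) d
    else
      match bnds with
      | bh :: bt =>
        if count + 1 = bh then
          match PySem.List.pyGet? delims (b : Int) with
          | none => none
          | some k =>
            pvBLoop rest' (pos+1) (count+1) bt delims (b+1) M nbg (conn ++ ['+']) (d.insert k (pos + nbg))
        else pvBLoop rest' (pos+1) (count+1) (bh :: bt) delims b M nbg (conn ++ ['-']) d
      | [] => pvBLoop rest' (pos+1) (count+1) [] delims b M nbg (conn ++ ['-']) d

def get_pus_connections_and_new_pu_delims_alt (line_CHAIN1 : String) (PUs_delim_to_keep : List Int) (pu_lengths : List Int) : String × (List (Int × Int)) × List Int :=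
  let nbg := pvCountLeadDash line_CHAIN1.toList
  match PySem.List.max? PUs_delim_to_keep id with
  | none => ("", [], [])   -- max() of empty list: ValueError
  | some M =>
    match pvBLoop (PySem.Chars.stripChars line_CHAIN1.toList ['-']) 1 0
        (pvBounds pu_lengths 0) PUs_delim_to_keep 0 M (nbg : Int) [] PySem.Dict.empty with
    | none => ("", [], [])
    | some (conn, d) => pvFinish (List.replicate nbg ' ' ++ conn) d PUs_delim_to_keep

-- pvCovers L R cum: A's pu_lengths indexing stays in range for the first R consumed residues
-- (a nonpositive length absorbs the rest of the trace, so it covers everything after it)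
def pvCovers : List Int → Int → Int → Bool
  | [], R, cum => decide (R ≤ cum)
  | l :: ls, R, cum => decide (R ≤ cum) || decide (l ≤ 0) || pvCovers ls R (cum + l)

-- pvEvents L R cum: how many PU start/end boundaries fall within the first R consumed residues
def pvEvents : List Int → Int → Int → Nat
  | [], _, _ => 0
  | l :: ls, R, cum =>
    if R < cum + 1 then 0
    else if l ≤ 0 then 1
    else (if l = 1 then 1 else if cum + l ≤ R then 2 else 1) + pvEvents ls R (cum + l)

-- Pre_ holds exactly where the Python A returns normally: the line has a non-gap character
-- (else the initial while loop raises IndexError), PUs_delim_to_keep is nonempty (else max()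
-- raises ValueError), the PUs cover every residue the loop consumes (else pu_lengths[idx]
-- raises IndexError) and there are enough delimiters for the boundaries reached (else
-- PUs_delim_to_keep[pu_idx] raises IndexError).
def Pre_get_pus_connections_and_new_pu_delims (line_CHAIN1 : String) (PUs_delim_to_keep : List Int) (pu_lengths : List Int) : Prop :=
  line_CHAIN1.toList.any (fun c => c ≠ '-') = true ∧ PUs_delim_to_keep ≠ [] ∧
  pvCovers pu_lengths (min ((line_CHAIN1.toList.countP (fun c => c ≠ '-') : Int)) ((PySem.List.max? PUs_delim_to_keep id).getD 0)) 0 = true ∧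
  pvEvents pu_lengths (min ((line_CHAIN1.toList.countP (fun c => c ≠ '-') : Int)) ((PySem.List.max? PUs_delim_to_keep id).getD 0)) 0 ≤ PUs_delim_to_keep.length
instance (line_CHAIN1 : String) (PUs_delim_to_keep : List Int) (pu_lengths : List Int) : Decidable (Pre_get_pus_connections_and_new_pu_delims line_CHAIN1 PUs_delim_to_keep pu_lengths) := by unfold Pre_get_pus_connections_and_new_pu_delims; infer_instance

def pvWitness_get_pus_connections_and_new_pu_delims : String × List Int × List Int := ("a-b", [1, 2], [2])

def Spec_get_pus_connections_and_new_pu_delims (line_CHAIN1 : String) (PUs_delim_to_keep : List Int) (pu_lengths : List Int) (out : String × (List (Int × Int)) × List Int) : Prop := out = get_pus_connections_and_new_pu_delims_alt line_CHAIN1 PUs_delim_to_keep pu_lengths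
instance (line_CHAIN1 : String) (PUs_delim_to_keep : List Int) (pu_lengths : List Int) (out : String × (List (Int × Int)) × List Int) : Decidable (Spec_get_pus_connections_and_new_pu_delims line_CHAIN1 PUs_delim_to_keep pu_lengths out) := by unfold Spec_get_pus_connections_and_new_pu_delims; infer_instance

-- ===== CLAIM (what is proved, stated in full; the proofs are below) =====
def Claim_equal_get_pus_connections_and_new_pu_delims : Prop := ∀ (line_CHAIN1 : String) (PUs_delim_to_keep : List Int) (pu_lengths : List Int), Dom_get_pus_connections_and_new_pu_delims line_CHAIN1 PUs_delim_to_keep pu_lengths → Pre_get_pus_connections_and_new_pu_delims line_CHAIN1 PUs_delim_to_keep pu_lengths → Spec_get_pus_connections_and_new_pu_delims line_CHAIN1 PUs_delim_to_keep pu_lengths (get_pus_connections_and_new_pu_delims line_CHAIN1 PUs_delim_to_keep pu_lengths)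

-- ===== LEMMAS AND PROOFS =====

-- head of the pending boundary list already passed (how B's pass stalls once A's machine stalls)
def pvHeadLe (bnds : List Int) (count : Int) : Prop :=
  match bnds with
  | [] => True
  | h :: _ => h ≤ count

def pvInv (L : List Int) (idx : Nat) (pu_len count : Int) (bnds : List Int) (Rend : Int) : Prop :=
  (pu_len = 1 ∧ bnds = pvBounds (L.drop idx) count ∧ pvCovers (L.drop idx) Rend count = true)
  ∨ (2 ≤ pu_len ∧ ∃ l, PySem.List.pyGet? L (idx : Int) = some l ∧
      ((l ≤ 0 ∧ pvHeadLe bnds count)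
       ∨ (2 ≤ l ∧ pu_len ≤ l ∧
          bnds = (count - pu_len + 1 + l) :: pvBounds (L.drop (idx+1)) (count - pu_len + 1 + l) ∧
          pvCovers (L.drop (idx+1)) Rend (count - pu_len + 1 + l) = true)))

lemma pvHeadLe_pvBounds (ls : List Int) (cum count : Int) (h : cum + 1 ≤ count) :
    pvHeadLe (pvBounds ls cum) count := by
  cases ls with
  | nil => trivial
  | cons l t =>
    by_cases h2 : (2:Int) ≤ l
    · simp only [pvBounds, if_pos h2, pvHeadLe]; omega
    · simp only [pvBounds, if_neg h2, pvHeadLe]; omega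

lemma pvHeadLe_mono (bnds : List Int) (c c' : Int) (hcc : c ≤ c') (h : pvHeadLe bnds c) :
    pvHeadLe bnds c' := by
  cases bnds with
  | nil => trivial
  | cons b t => simp only [pvHeadLe] at h ⊢; omega

lemma pvAWhile_eq (s : List Char) (h : s.any (fun c => c ≠ '-') = true) :
    pvAWhile s = some (pvCountLeadDash s) := by
  induction s with
  | nil => simp at h
  | cons c cs ih =>
    by_cases hc : c = '-'
    · have h' : (cs.any fun c => decide (c ≠ '-')) = true := by
        simp [hc] at h ⊢; exact h
      simp [pvAWhile, pvCountLeadDash, hc, ih h']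
    · simp [pvAWhile, pvCountLeadDash, hc]

lemma countP_dropWhile (q p : Char → Bool) (hq : ∀ x, q x = true → p x = false)
    (l : List Char) : (List.dropWhile q l).countP p = l.countP p := by
  induction l with
  | nil => rfl
  | cons c cs ih =>
    by_cases hc : q c = true
    · simp [hc, ih, hq c hc]
    · simp [hc]

lemma countP_stripChars (s : List Char) :
    (PySem.Chars.stripChars s ['-']).countP (fun c => c ≠ '-') = s.countP (fun c => c ≠ '-') := by
  have hq : ∀ x : Char, (List.contains ['-'] x) = true → (decide (x ≠ '-')) = false := by
    intro x hx; simp at hx; simp [hx]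
  simp only [PySem.Chars.stripChars]
  rw [List.countP_reverse, countP_dropWhile _ _ hq, List.countP_reverse, countP_dropWhile _ _ hq]

lemma foldl_some_isSome {A : Type} (f : Option A → A → Option A)
    (hf : ∀ m x, (f (some m) x).isSome = true) :
    ∀ (l : List A) (m : A), (List.foldl f (some m) l).isSome = true := by
  intro l
  induction l with
  | nil => intro m; rfl
  | cons a l ih =>
    intro m
    rw [List.foldl_cons]
    obtain ⟨y, hy⟩ := Option.isSome_iff_exists.mp (hf m a)
    rw [hy]
    exact ih y

lemma max?_getD_of_ne_nil (xs : List Int) (h : xs ≠ []) :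
    PySem.List.max? xs id = some ((PySem.List.max? xs id).getD 0) := by
  match xs with
  | [] => exact absurd rfl h
  | x :: l =>
    have hs : (PySem.List.max? (x :: l) id).isSome = true := by
      show (List.foldl _ (some x) l).isSome = true
      refine foldl_some_isSome _ (fun m y => ?_) l x
      show (if id m < id y then some y else some m).isSome = true
      by_cases hm : id m < id y
      · rw [if_pos hm]; rfl
      · rw [if_neg hm]; rfl
    obtain ⟨y, hy⟩ := Option.isSome_iff_exists.mp hs
    rw [hy]
    rfl

lemma pvALoop_prefix (pre : List Char) : ∀ (rest : List Char) i conn d delims L idx pu_idx pu_len g nbg,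
    pvALoop rest i (pre ++ conn) d delims L idx pu_idx pu_len g nbg
      = (pvALoop rest i conn d delims L idx pu_idx pu_len g nbg).map (fun r => (pre ++ r.1, r.2)) := by
  intro rest
  induction rest with
  | nil => intros; simp [pvALoop]
  | cons res rest' ih =>
    intro i conn d delims L idx pu_idx pu_len g nbg
    simp only [pvALoop]
    cases PySem.List.max? delims id with
    | none => rfl
    | some M =>
      by_cases hbrk : i - g > M
      · simp [hbrk]
      · simp only [if_neg hbrk]
        by_cases hres : res = '-'
        · simp only [if_pos hres, List.append_assoc]; apply ih
        · simp only [if_neg hres]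
          cases PySem.List.pyGet? L (idx : Int) with
          | none => rfl
          | some li =>
            by_cases h1 : pu_len = li
            · simp only [if_pos h1]
              cases PySem.List.pyGet? delims (pu_idx : Int) with
              | none => rfl
              | some k => simp only [List.append_assoc]; apply ih
            · simp only [if_neg h1]
              by_cases h2 : pu_len = 1
              · simp only [if_pos h2]
                cases PySem.List.pyGet? delims (pu_idx : Int) with
                | none => rfl
                | some k => simp only [List.append_assoc]; apply ih
              · simp only [if_neg h2, List.append_assoc]; apply ih

lemma pvLoop_eq (delims L : List Int) (M nbg : Int) (hM : PySem.List.max? delims id = some M) :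
    ∀ (rest : List Char) (i gaps count : Int) (conn : List Char) (d : PySem.Dict Int Int)
      (idx b : Nat) (pu_len : Int) (bnds : List Int),
      count = i - 1 - gaps →
      pvInv L idx pu_len count bnds (min (count + (rest.countP (fun c => c ≠ '-') : Int)) M) →
      pvALoop rest i conn d delims L idx b pu_len gaps nbg
        = pvBLoop rest i count bnds delims b M nbg conn d := by
  intro rest
  induction rest with
  | nil => intros; simp [pvALoop, pvBLoop]
  | cons res rest' ih =>
    intro i gaps count conn d idx b pu_len bnds hcount hinv
    simp only [pvALoop, pvBLoop, hM]
    by_cases hbrk : M ≤ count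
    · rw [if_pos (by omega : i - gaps > M), if_pos hbrk]
    · rw [if_neg (by omega : ¬ i - gaps > M), if_neg hbrk]
      by_cases hres : res = '-'
      · rw [if_pos hres, if_pos hres]
        apply ih _ _ _ _ _ _ _ _ _ (by omega)
        have hcp : ((res :: rest').countP (fun c => c ≠ '-') : Int) = (rest'.countP (fun c => c ≠ '-') : Int) := by
          simp [hres]
        rwa [hcp] at hinv
      · rw [if_neg hres, if_neg hres]
        have hcp : ((res :: rest').countP (fun c => c ≠ '-') : Int) = (rest'.countP (fun c => c ≠ '-') : Int) + 1 := by
          simp [hres]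
        rw [hcp] at hinv
        set cR : Int := (rest'.countP (fun c => c ≠ '-') : Int) with hcR
        have hcR0 : 0 ≤ cR := by positivity
        have hRend : min (count + (cR + 1)) M = min ((count + 1) + cR) M := by ring_nf
        rw [hRend] at hinv
        clear_value cR
        rcases hinv with ⟨hpl, hbnds, hcov⟩ | ⟨hpl2, l, hget, hcase⟩
        · -- pu_len = 1 : aligned at a PU start, cum = count
          subst hpl
          cases hdrop : L.drop idx with
          | nil =>
            exfalso
            rw [hdrop] at hcov
            simp only [pvCovers, decide_eq_true_eq] at hcov
            omega
          | cons l ls =>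
            have hls : L.drop (idx+1) = ls := by
              have h := congrArg List.tail hdrop
              simpa [List.tail_drop] using h
            have hget : PySem.List.pyGet? L (idx : Int) = some l := by
              rw [PySem.List.pyGet?_natCast, ← List.head?_drop, hdrop]; rfl
            rw [hdrop] at hbnds hcov
            subst hbnds
            rw [hget]
            simp only [pvCovers, Bool.or_eq_true, decide_eq_true_eq] at hcov
            by_cases hl0 : l ≤ 0
            · -- absorbing PU starts here: both sides emit '+' once, then stall
              rw [show pvBounds (l :: ls) count = (count + 1) :: pvBounds ls (count + l) from by
                simp only [pvBounds]; rw [if_neg (by omega : ¬ (2:Int) ≤ l)]]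
              dsimp only
              rw [if_neg (by omega : ¬ (1:Int) = l), if_pos rfl, if_pos rfl]
              clear hcov
              generalize PySem.List.pyGet? delims (b : Int) = ko
              cases ko with
              | none => rfl
              | some k =>
                apply ih _ _ _ _ _ _ _ _ _ (by omega)
                exact Or.inr ⟨by omega, l, hget,
                  Or.inl ⟨hl0, pvHeadLe_pvBounds ls (count + l) (count + 1) (by omega)⟩⟩
            · have hcov' : pvCovers ls (min ((count+1) + cR) M) (count + l) = true := by
                rcases hcov with (h | h) | h
                · omega
                · omega
                · exact h
              by_cases hl1 : l = 1
              · -- a length-1 PU: single '+'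
                subst hl1
                rw [show pvBounds (1 :: ls) count = (count + 1) :: pvBounds ls (count + 1) from by
                  norm_num [pvBounds]]
                dsimp only
                rw [if_pos rfl, if_pos rfl]
                cases hk : PySem.List.pyGet? delims (b : Int) with
                | none => rfl
                | some k =>
                  apply ih _ _ _ _ _ _ _ _ _ (by omega)
                  refine Or.inl ⟨rfl, ?_, ?_⟩
                  · rw [hls]
                  · rw [hls]; exact hcov'
              · -- 2 ≤ l : start of a longer PU
                have hl2 : (2:Int) ≤ l := by omega
                rw [show pvBounds (l :: ls) count = (count + 1) :: (count + l) :: pvBounds ls (count + l) from by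
                  simp [pvBounds, hl2]]
                dsimp only
                rw [if_neg (by omega : ¬ (1:Int) = l), if_pos rfl, if_pos rfl]
                cases hk : PySem.List.pyGet? delims (b : Int) with
                | none => rfl
                | some k =>
                  apply ih _ _ _ _ _ _ _ _ _ (by omega)
                  refine Or.inr ⟨by omega, l, hget, Or.inr ⟨hl2, by omega, ?_, ?_⟩⟩
                  · rw [(by omega : count + 1 - (1 + 1) + 1 + l = count + l), hls]
                  · rw [(by omega : count + 1 - (1 + 1) + 1 + l = count + l), hls]; exact hcov'
        · -- 2 ≤ pu_len : inside a PU
          rw [hget]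
          rcases hcase with ⟨hl0, hble⟩ | ⟨hl2, hple, hbnds, hcov⟩
          · -- absorbing PU: A's pu_len never matches l ≤ 0, B's next boundary is already passed
            dsimp only
            rw [if_neg (by omega : ¬ pu_len = l), if_neg (by omega : ¬ pu_len = 1)]
            have hrec := ih (i+1) gaps (count+1) (conn ++ ['-']) d idx b (pu_len+1) bnds (by omega)
              (Or.inr ⟨by omega, l, hget, Or.inl ⟨hl0, pvHeadLe_mono bnds count (count+1) (by omega) hble⟩⟩)
            cases bnds with
            | nil => exact hrec
            | cons bh bt =>
              simp only [pvHeadLe] at hble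
              dsimp only
              rw [if_neg (by omega : ¬ count + 1 = bh)]
              exact hrec
          · subst hbnds
            dsimp only
            by_cases hend : pu_len = l
            · rw [if_pos hend, if_pos (by omega : count + 1 = count - pu_len + 1 + l)]
              cases hk : PySem.List.pyGet? delims (b : Int) with
              | none => rfl
              | some k =>
                apply ih _ _ _ _ _ _ _ _ _ (by omega)
                refine Or.inl ⟨rfl, ?_, ?_⟩
                · rw [(by omega : count - pu_len + 1 + l = count + 1)]
                · rw [(by omega : count - pu_len + 1 + l = count + 1)] at hcov; exact hcov
            · rw [if_neg hend, if_neg (by omega : ¬ pu_len = 1),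
                  if_neg (by omega : ¬ count + 1 = count - pu_len + 1 + l)]
              apply ih _ _ _ _ _ _ _ _ _ (by omega)
              refine Or.inr ⟨by omega, l, hget, Or.inr ⟨hl2, by omega, ?_, ?_⟩⟩
              · rw [(by omega : count + 1 - (pu_len + 1) + 1 + l = count - pu_len + 1 + l)]
              · rw [(by omega : count + 1 - (pu_len + 1) + 1 + l = count - pu_len + 1 + l)]; exact hcov

-- ===== VERDICT (by name: the statement is the Claim_ definition above) =====
theorem get_pus_connections_and_new_pu_delims_spec : Claim_equal_get_pus_connections_and_new_pu_delims := by
  intro line delims L _hDom hPre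
  obtain ⟨hnd, hne, hcov, _hev⟩ := hPre
  unfold Spec_get_pus_connections_and_new_pu_delims
  unfold get_pus_connections_and_new_pu_delims get_pus_connections_and_new_pu_delims_alt
  have hM : PySem.List.max? delims id = some ((PySem.List.max? delims id).getD 0) :=
    max?_getD_of_ne_nil delims hne
  rw [pvAWhile_eq _ hnd, hM]
  dsimp only
  have hpre := pvALoop_prefix (List.replicate (pvCountLeadDash line.toList) ' ')
      (PySem.Chars.stripChars line.toList ['-']) 1 [] PySem.Dict.empty delims L 0 0 1 0
      ((pvCountLeadDash line.toList : Nat) : Int)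
  rw [List.append_nil] at hpre
  rw [hpre]
  rw [pvLoop_eq delims L ((PySem.List.max? delims id).getD 0)
      ((pvCountLeadDash line.toList : Nat) : Int) hM
      (PySem.Chars.stripChars line.toList ['-']) 1 0 0 [] PySem.Dict.empty 0 0 1
      (pvBounds L 0) (by ring) ?_]
  · cases pvBLoop (PySem.Chars.stripChars line.toList ['-']) 1 0 (pvBounds L 0) delims 0
        ((PySem.List.max? delims id).getD 0) ((pvCountLeadDash line.toList : Nat) : Int) []
        PySem.Dict.empty with
    | none => rfl
    | some p => rfl
  · refine Or.inl ⟨rfl, by rw [List.drop_zero], ?_⟩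
    rw [List.drop_zero, countP_stripChars, zero_add]
    exact hcov
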